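-- pv_equiv track=rewrite | github.com/invisi101/FPLGaffer2 | src/season/manager.py | _get_next_gw
-- ===== SOURCE A (Python) =====
-- def _get_next_gw(bootstrap: dict) -> int | None:
--     for event in bootstrap.get("events", []):
--         if event.get("is_next"):
--             return event["id"]
--     # If no 'is_next', fall back to the one after 'is_current'
--     for event in bootstrap.get("events", []):
--         if event.get("is_current"):
--             next_id = event["id"] + 1
--             if next_id > 38:
--                 return None  # Season is over
--             return next_id
--     return None
-- ===== SOURCE B (Python) =====
-- def _get_next_gw(bootstrap: dict) -> int | None:
--     # Single pass: return the first is_next id immediately; remember the first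
--     # is_current event and resolve its id only after the loop.
--     current = None
--     for event in bootstrap.get("events", []):
--         if event.get("is_next"):
--             return event["id"]
--         if current is None and event.get("is_current"):
--             current = event
--     if current is not None:
--         next_id = current["id"] + 1
--         return None if next_id > 38 else next_id
--     return None
-- ===== Notes on version B (the rewrite author's own statement) =====
-- stated objective: simpler
-- what changed: Replaces A's two full passes over the events with one single pass that returns the first is_next id immediately and remembers the first is_current event for the post-loop fallback.
import Mathlib
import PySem

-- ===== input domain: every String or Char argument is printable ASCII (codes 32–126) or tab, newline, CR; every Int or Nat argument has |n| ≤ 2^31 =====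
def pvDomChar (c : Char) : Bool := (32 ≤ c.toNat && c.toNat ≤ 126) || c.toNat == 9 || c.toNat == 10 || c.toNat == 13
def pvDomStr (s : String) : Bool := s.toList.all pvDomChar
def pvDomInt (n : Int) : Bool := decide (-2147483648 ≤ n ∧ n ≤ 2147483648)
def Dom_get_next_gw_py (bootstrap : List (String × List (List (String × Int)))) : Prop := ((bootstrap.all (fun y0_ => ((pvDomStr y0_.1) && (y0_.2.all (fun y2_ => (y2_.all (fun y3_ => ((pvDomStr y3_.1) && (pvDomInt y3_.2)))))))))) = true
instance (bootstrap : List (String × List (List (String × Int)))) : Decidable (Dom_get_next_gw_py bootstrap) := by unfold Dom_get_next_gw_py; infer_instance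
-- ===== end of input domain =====

-- B is a single pass over the events (A makes two); same return value on every non-raising input.

-- ===== PORT A =====
-- truthiness of event.get(k): present and nonzero
def pvTruthy (o : Option Int) : Bool := match o with | some v => v != 0 | none => false

def pvEvGet (e : List (String × Int)) (k : String) : Option Int := (PySem.Dict.mk e).get? k

def pvEventsOf (bootstrap : List (String × List (List (String × Int)))) : List (List (String × Int)) :=
  ((PySem.Dict.mk bootstrap).get? "events").getD []

-- first for-loop of A: return event["id"] at the first truthy is_next (a missing "id" there is a KeyError, excluded by Pre_)
def pvALoop1 : List (List (String × Int)) → Option Int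
  | [] => none
  | e :: rest => if pvTruthy (pvEvGet e "is_next") then pvEvGet e "id" else pvALoop1 rest

-- second for-loop of A (a missing "id" on the chosen event is a KeyError, excluded by Pre_)
def pvALoop2 : List (List (String × Int)) → Option Int
  | [] => none
  | e :: rest =>
    if pvTruthy (pvEvGet e "is_current") then
      match pvEvGet e "id" with
      | some i => if i + 1 > 38 then none else some (i + 1)
      | none => none
    else pvALoop2 rest

def get_next_gw_py (bootstrap : List (String × List (List (String × Int)))) : Option Int :=
  match pvALoop1 (pvEventsOf bootstrap) with
  | some i => some i
  | none => pvALoop2 (pvEventsOf bootstrap)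

-- ===== PORT B =====
-- post-loop fallback of B: the remembered is_current event, if any
def pvBFinish : Option (List (String × Int)) → Option Int
  | some e =>
    match pvEvGet e "id" with
    | some i => if i + 1 > 38 then none else some (i + 1)
    | none => none
  | none => none

-- single loop of B, carrying the first is_current event seen so far
def pvBLoop : List (List (String × Int)) → Option (List (String × Int)) → Option Int
  | [], cur => pvBFinish cur
  | e :: rest, cur =>
    if pvTruthy (pvEvGet e "is_next") then pvEvGet e "id"
    else pvBLoop rest (if cur.isNone && pvTruthy (pvEvGet e "is_current") then some e else cur)

def get_next_gw_py_alt (bootstrap : List (String × List (List (String × Int)))) : Option Int :=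
  pvBLoop (pvEventsOf bootstrap) none

-- ===== PRECONDITION & SPEC =====
-- Pre_ excludes exactly the inputs where Python A raises KeyError: the first event with a
-- truthy is_next (or, failing that, the first with a truthy is_current) has no "id" key.
def pvPreCheck (bootstrap : List (String × List (List (String × Int)))) : Bool :=
  match (pvEventsOf bootstrap).find? (fun e => pvTruthy (pvEvGet e "is_next")) with
  | some e => (pvEvGet e "id").isSome
  | none =>
    match (pvEventsOf bootstrap).find? (fun e => pvTruthy (pvEvGet e "is_current")) with
    | some e => (pvEvGet e "id").isSome
    | none => true

def Pre_get_next_gw_py (bootstrap : List (String × List (List (String × Int)))) : Prop :=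
  pvPreCheck bootstrap = true
instance (bootstrap : List (String × List (List (String × Int)))) : Decidable (Pre_get_next_gw_py bootstrap) := by unfold Pre_get_next_gw_py; infer_instance

def pvWitness_get_next_gw_py : (List (String × List (List (String × Int)))) :=
  [("events", [[("is_current", 1), ("id", 5)], [("is_next", 1), ("id", 6)]])]

def Spec_get_next_gw_py (bootstrap : List (String × List (List (String × Int)))) (out : Option Int) : Prop := out = get_next_gw_py_alt bootstrap
instance (bootstrap : List (String × List (List (String × Int)))) (out : Option Int) : Decidable (Spec_get_next_gw_py bootstrap out) := by unfold Spec_get_next_gw_py; infer_instance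

-- ===== CLAIM (what is proved, stated in full; the proofs are below) =====
def Claim_equal_get_next_gw_py : Prop := ∀ (bootstrap : List (String × List (List (String × Int)))), Dom_get_next_gw_py bootstrap → Pre_get_next_gw_py bootstrap → Spec_get_next_gw_py bootstrap (get_next_gw_py bootstrap)

-- ===== LEMMAS AND PROOFS =====
theorem pvALoop1_eq (l : List (List (String × Int))) :
    pvALoop1 l = match l.find? (fun e => pvTruthy (pvEvGet e "is_next")) with
      | some e => pvEvGet e "id"
      | none => none := by
  induction l with
  | nil => rfl
  | cons e rest ih =>
    simp only [pvALoop1, List.find?]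
    by_cases h : pvTruthy (pvEvGet e "is_next") = true
    · simp [h]
    · simp [h, ih]

theorem pvALoop2_eq (l : List (List (String × Int))) :
    pvALoop2 l = pvBFinish (l.find? (fun e => pvTruthy (pvEvGet e "is_current"))) := by
  induction l with
  | nil => rfl
  | cons e rest ih =>
    simp only [pvALoop2, List.find?]
    by_cases h : pvTruthy (pvEvGet e "is_current") = true
    · simp [h, pvBFinish]
    · simp [h, ih]

theorem pvBLoop_eq (l : List (List (String × Int))) :
    ∀ cur, pvBLoop l cur = match l.find? (fun e => pvTruthy (pvEvGet e "is_next")) with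
      | some e => pvEvGet e "id"
      | none =>
        pvBFinish (match cur with
          | some e => some e
          | none => l.find? (fun e => pvTruthy (pvEvGet e "is_current"))) := by
  induction l with
  | nil => intro cur; cases cur <;> rfl
  | cons e rest ih =>
    intro cur
    simp only [pvBLoop, List.find?]
    by_cases hn : pvTruthy (pvEvGet e "is_next") = true
    · simp [hn]
    · simp only [hn, Bool.false_eq_true, if_false, ih, cond_false]
      cases cur with
      | some c => simp
      | none =>
        by_cases hc : pvTruthy (pvEvGet e "is_current") = true
        · simp [hc]
        · simp [hc]

-- ===== VERDICT (by name: the statement is the Claim_ definition above) =====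
theorem get_next_gw_py_spec : Claim_equal_get_next_gw_py := by
  intro bootstrap _hdom hpre
  unfold Spec_get_next_gw_py get_next_gw_py get_next_gw_py_alt
  unfold Pre_get_next_gw_py pvPreCheck at hpre
  rw [pvALoop1_eq, pvBLoop_eq, pvALoop2_eq]
  rcases hfn : (pvEventsOf bootstrap).find? (fun e => pvTruthy (pvEvGet e "is_next")) with _ | e
  · rfl
  · rw [hfn] at hpre
    simp only at hpre ⊢
    rcases hid : pvEvGet e "id" with _ | i <;> simp_all
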